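-- pv_equiv track=rewrite | github.com/grasshopperTrainer/coding_practice | baekjoon/accepted/3078 좋은 친구.py | solution
-- ===== SOURCE A (Python) =====
-- from collections import deque
--
-- def solution(N, K, names):
--     groups = {}
--     for grade, name in enumerate(names):
--         groups.setdefault(len(name), []).append((name, grade))
--
--     count = 0
--     for name_len, group in groups.items():
--         que = deque()
--         for name, grade in group:
--             while que:
--                 if que[0] < grade - K:
--                     que.popleft()
--                 else:
--                     break
--             count += len(que)
--             que.append(grade)
--
--     return count
-- ===== SOURCE B (Python) =====
-- from bisect import bisect_left
--
-- def solution(N, K, names):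
--     # Group grades (positions) by name length; each group list is increasing.
--     groups = {}
--     for grade, name in enumerate(names):
--         groups.setdefault(len(name), []).append(grade)
--
--     count = 0
--     for grades in groups.values():
--         for i, g in enumerate(grades):
--             count += i - bisect_left(grades, g - K, 0, i)
--     return count
-- ===== Notes on version B (the rewrite author's own statement) =====
-- stated objective: idiomatic
-- what changed: Replaces the per-group deque sliding window (while-loop popping the front) with storing only the sorted grade list per length group and counting partners via bisect_left (i - first index with grade >= g-K), eliminating the deque and the inner while-loop entirely.
import Mathlib
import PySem

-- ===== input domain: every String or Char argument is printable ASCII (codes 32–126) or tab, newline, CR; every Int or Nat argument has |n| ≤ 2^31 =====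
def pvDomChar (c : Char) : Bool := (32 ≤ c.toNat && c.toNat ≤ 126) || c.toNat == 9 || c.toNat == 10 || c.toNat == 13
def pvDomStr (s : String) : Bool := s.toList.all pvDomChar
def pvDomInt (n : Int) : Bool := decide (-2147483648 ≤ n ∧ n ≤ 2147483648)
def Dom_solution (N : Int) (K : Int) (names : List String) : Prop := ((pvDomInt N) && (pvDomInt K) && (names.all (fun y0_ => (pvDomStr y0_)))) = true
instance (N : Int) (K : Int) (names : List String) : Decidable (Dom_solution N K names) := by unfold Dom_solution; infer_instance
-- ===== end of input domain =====

-- B replaces A's per-group deque sliding window with a bisect_left count into the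
-- (already sorted) per-length grade list; same value everywhere (objective: idiomatic).

-- B replaces A's per-group deque sliding window with a bisect_left count into the
-- (already sorted) per-length grade list; same value everywhere (objective: idiomatic).

-- ===== PORT A =====
-- the inner 'while que: if que[0] < grade - K: que.popleft() else: break'
def popLoop (que : List Int) (bound : Int) : List Int :=
  match que with
  | [] => []
  | q :: rest => if q < bound then popLoop rest bound else q :: rest

-- the 'for name, grade in group' loop, carrying (count, que)
def groupLoopA (K : Int) (group : List (String × Int)) (count : Int) (que : List Int) : Int :=
  match group with
  | [] => count
  | p :: rest =>
      let que' := popLoop que (p.2 - K)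
      groupLoopA K rest (count + (que'.length : Int)) (que' ++ [p.2])

def solution (N : Int) (K : Int) (names : List String) : Int :=
  let groups : PySem.Dict Int (List (String × Int)) :=
    (PySem.List.enumerate names).foldl
      (fun d p => d.modify (PySem.Str.len p.2) [] (fun v => v ++ [(p.2, p.1)]))
      PySem.Dict.empty
  groups.items.foldl (fun count pr => groupLoopA K pr.2 count []) 0

-- ===== PORT B =====
def solution_alt (N : Int) (K : Int) (names : List String) : Int :=
  let groups : PySem.Dict Int (List Int) :=
    (PySem.List.enumerate names).foldl
      (fun d p => d.modify (PySem.Str.len p.2) [] (fun v => v ++ [p.1]))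
      PySem.Dict.empty
  groups.values.foldl
    (fun count grades =>
      (PySem.List.enumerate grades).foldl
        (fun c p =>
          -- bisect_left(grades, g - K, 0, i) = bisect_left on the length-i prefix
          c + p.1 - ((PySem.List.bisectLeft (grades.take p.1.toNat) (p.2 - K) : Nat) : Int))
        count)
    0

-- ===== PRECONDITION & SPEC =====
def Spec_solution (N : Int) (K : Int) (names : List String) (out : Int) : Prop := out = solution_alt N K names
instance (N : Int) (K : Int) (names : List String) (out : Int) : Decidable (Spec_solution N K names out) := by unfold Spec_solution; infer_instance

-- ===== CLAIM (what is proved, stated in full; the proofs are below) =====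
def Claim_equal_solution : Prop := ∀ (N : Int) (K : Int) (names : List String), Dom_solution N K names → Spec_solution N K names (solution N K names)

-- ===== LEMMAS AND PROOFS =====

-- A's inner loop only uses the grade component of each group entry
def loopA (K : Int) (gs : List Int) (count : Int) (que : List Int) : Int :=
  match gs with
  | [] => count
  | g :: rest =>
      let que' := popLoop que (g - K)
      loopA K rest (count + (que'.length : Int)) (que' ++ [g])

-- common reference loop: per grade, count the earlier grades ≥ g - K
def loopB (K : Int) (gs : List Int) (count : Int) (pre : List Int) : Int :=
  match gs with
  | [] => count
  | g :: rest =>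
      loopB K rest (count + ((pre.filter (fun x => g - K ≤ x)).length : Int)) (pre ++ [g])

lemma groupLoopA_eq_loopA (K : Int) (group : List (String × Int)) (c : Int) (que : List Int) :
    groupLoopA K group c que = loopA K (group.map Prod.snd) c que := by
  induction group generalizing c que with
  | nil => rfl
  | cons p rest ih => simp [groupLoopA, loopA, ih]

lemma popLoop_eq_filter (que : List Int) (t : Int) (h : que.Pairwise (· ≤ ·)) :
    popLoop que t = que.filter (fun x => t ≤ x) := by
  induction que with
  | nil => rfl
  | cons q rest ih =>
      rcases List.pairwise_cons.mp h with ⟨hq, hrest⟩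
      by_cases hlt : q < t
      · simp [popLoop, hlt, ih hrest, show ¬ t ≤ q by omega]
      · have : rest.filter (fun x => t ≤ x) = rest :=
          List.filter_eq_self.mpr (fun x hx => by
            have := hq x hx; simp; omega)
        simp [popLoop, hlt, show t ≤ q by omega, this]

lemma loopA_eq_loopB (K : Int) (gs : List Int) (c : Int) (que pre : List Int)
    (hgs : gs.Pairwise (· ≤ ·)) (hque : que.Pairwise (· ≤ ·))
    (hq : ∀ g ∈ gs, que.filter (fun x => g - K ≤ x) = pre.filter (fun x => g - K ≤ x))
    (hpre : ∀ x ∈ pre, ∀ g ∈ gs, x ≤ g) :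
    loopA K gs c que = loopB K gs c pre := by
  induction gs generalizing c que pre with
  | nil => rfl
  | cons g rest ih =>
      rcases List.pairwise_cons.mp hgs with ⟨hg, hrest⟩
      have hpop : popLoop que (g - K) = pre.filter (fun x => g - K ≤ x) := by
        rw [popLoop_eq_filter que (g - K) hque]
        exact hq g (List.mem_cons_self ..)
      have hmem_pre : ∀ x ∈ pre.filter (fun x => g - K ≤ x), x ∈ pre :=
        fun x hx => List.mem_of_mem_filter hx
      simp only [loopA, loopB, hpop]
      apply ih
      · exact hrest
      · -- (pre.filter …) ++ [g] is sorted
        rw [List.pairwise_append]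
        refine ⟨?_, List.pairwise_singleton _ _, ?_⟩
        · rw [← hq g (List.mem_cons_self ..)]
          exact hque.filter _
        · intro x hx y hy
          rw [List.mem_singleton] at hy
          rw [hy]
          exact hpre x (hmem_pre x hx) g (List.mem_cons_self ..)
      · intro g2 hg2
        have hgle : g ≤ g2 := hg g2 hg2
        rw [List.filter_append, List.filter_append, List.filter_filter]
        have hcomb : ∀ x ∈ pre, (decide (g2 - K ≤ x) && decide (g - K ≤ x)) = decide (g2 - K ≤ x) := by
          intro x _; by_cases h2 : g2 - K ≤ x
          · simp [h2]; omega
          · simp [h2]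
        rw [List.filter_congr hcomb]
      · intro x hx g2 hg2
        rcases List.mem_append.mp hx with h1 | h1
        · exact hpre x h1 g2 (List.mem_cons_of_mem _ hg2)
        · rw [List.mem_singleton] at h1
          rw [h1]; exact hg g2 hg2


lemma sub_bisect (pre : List Int) (t : Int) (h : pre.Pairwise (· ≤ ·)) :
    (pre.length : Int) - ((PySem.List.bisectLeft pre t : Nat) : Int)
      = ((pre.filter (fun x => t ≤ x)).length : Int) := by
  obtain ⟨hble, hlt, hge⟩ := PySem.List.bisectLeft_spec pre t h
  set b := PySem.List.bisectLeft pre t with hb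
  have hfilt : pre.filter (fun x => t ≤ x) = pre.drop b := by
    conv_lhs => rw [← List.take_append_drop b pre]
    rw [List.filter_append]
    have h1 : (pre.take b).filter (fun x => t ≤ x) = [] := by
      apply List.filter_eq_nil_iff.mpr
      intro x hx
      obtain ⟨j, hj, hjx⟩ := List.mem_iff_getElem.mp hx
      have hj' : j < min b pre.length := by simpa using hj
      rw [List.getElem_take] at hjx
      have := hlt j (by omega) (by omega)
      rw [hjx] at this
      simp; omega
    have h2 : (pre.drop b).filter (fun x => t ≤ x) = pre.drop b := by
      apply List.filter_eq_self.mpr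
      intro x hx
      obtain ⟨j, hj, hjx⟩ := List.mem_iff_getElem.mp hx
      rw [List.getElem_drop] at hjx
      have hj' : j < pre.length - b := by simpa using hj
      have := hge (b + j) (by omega) (by omega)
      rw [hjx] at this
      simp; omega
    rw [h1, h2, List.nil_append]
  rw [hfilt, List.length_drop]
  omega

lemma enumFold_eq_loopB (K : Int) (full : List Int) (hfull : full.Pairwise (· ≤ ·)) :
    ∀ (gs : List Int) (s : Nat) (c : Int), full = full.take s ++ gs →
    (PySem.List.enumerate gs (s : Int)).foldl
      (fun c p => c + p.1 - ((PySem.List.bisectLeft (full.take p.1.toNat) (p.2 - K) : Nat) : Int)) c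
      = loopB K gs c (full.take s) := by
  intro gs
  induction gs with
  | nil => intro s c h; rfl
  | cons g rest ih =>
      intro s c h
      have hlen := congrArg List.length h
      simp [List.length_take] at hlen
      have hslen : (full.take s).length = s := by simp [List.length_take]; omega
      have htake1 : full.take (s + 1) = full.take s ++ [g] := by
        conv_lhs => rw [h]
        rw [List.take_append]
        simp [hslen]
      have hpre : (full.take s).Pairwise (· ≤ ·) := hfull.sublist (List.take_sublist s full)
      rw [PySem.List.enumerate_cons, List.foldl_cons]
      have hstep : c + (s : Int) - ((PySem.List.bisectLeft (full.take ((s : Int)).toNat) (g - K) : Nat) : Int)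
          = c + (((full.take s).filter (fun x => g - K ≤ x)).length : Int) := by
        rw [Int.toNat_natCast]
        have := sub_bisect (full.take s) (g - K) hpre
        rw [hslen] at this
        omega
      rw [hstep]
      have hrec := ih (s + 1) (c + (((full.take s).filter (fun x => g - K ≤ x)).length : Int))
        (by rw [htake1, List.append_assoc]; exact h)
      rw [show ((s : Int) + 1) = (((s + 1 : Nat)) : Int) from by push_cast; ring] at *
      rw [hrec, loopB, htake1]

lemma items_eq_map_keys {ν : Type} (d : PySem.Dict Int ν) (h : d.keys.Nodup) (v0 : ν) :
    d.items = d.keys.map (fun k => (k, d.getD k v0)) := by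
  have hk : d.keys.map (fun k => (k, d.getD k v0))
      = d.items.map (fun p => (p.1, d.getD p.1 v0)) := by
    simp only [PySem.Dict.keys, List.map_map]
    rfl
  rw [hk]
  conv_lhs => rw [show d.items = d.items.map id from (List.map_id _).symm]
  apply List.map_congr_left
  intro p hp
  have hv : d.getD p.1 v0 = p.2 :=
    PySem.Dict.getD_of_mem_items d (by simpa using hp) h v0
  simp [hv]

lemma grades_sorted (names : List String) (k : Int) :
    (((PySem.List.enumerate names).filter (fun p => PySem.Str.len p.2 == k)).map
      (fun p => p.1)).Pairwise (· ≤ ·) := by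
  have hsub : (((PySem.List.enumerate names).filter (fun p => PySem.Str.len p.2 == k)).map
      (fun p => p.1)).Sublist ((PySem.List.enumerate names).map (fun p => p.1)) :=
    by apply List.Sublist.map; exact List.filter_sublist
  have hall : ((PySem.List.enumerate names).map (fun p => p.1)).Pairwise (· ≤ ·) := by
    rw [PySem.List.map_fst_enumerate]
    exact (PySem.List.pairwise_lt_pyRange_one _ _).imp le_of_lt
  exact hall.sublist hsub

lemma dictA_keys (names : List String) :
    ((PySem.List.enumerate names).foldl
      (fun d p => d.modify (PySem.Str.len p.2) [] (fun v => v ++ [(p.2, p.1)]))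
      (PySem.Dict.empty : PySem.Dict Int (List (String × Int)))).keys
    = PySem.Set.update [] ((PySem.List.enumerate names).map (fun p => PySem.Str.len p.2)) :=
  PySem.Dict.keys_foldl_modify_key _ _ _ _ _

lemma dictB_keys (names : List String) :
    ((PySem.List.enumerate names).foldl
      (fun d p => d.modify (PySem.Str.len p.2) [] (fun v => v ++ [p.1]))
      (PySem.Dict.empty : PySem.Dict Int (List Int))).keys
    = PySem.Set.update [] ((PySem.List.enumerate names).map (fun p => PySem.Str.len p.2)) :=
  PySem.Dict.keys_foldl_modify_key _ _ _ _ _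

lemma dictA_nodup (names : List String) :
    ((PySem.List.enumerate names).foldl
      (fun d p => d.modify (PySem.Str.len p.2) [] (fun v => v ++ [(p.2, p.1)]))
      (PySem.Dict.empty : PySem.Dict Int (List (String × Int)))).keys.Nodup :=
  PySem.Dict.nodup_keys_foldl_modify_key _ _ _ _ _ (by simp [PySem.Dict.keys_empty])

lemma dictB_nodup (names : List String) :
    ((PySem.List.enumerate names).foldl
      (fun d p => d.modify (PySem.Str.len p.2) [] (fun v => v ++ [p.1]))
      (PySem.Dict.empty : PySem.Dict Int (List Int))).keys.Nodup :=
  PySem.Dict.nodup_keys_foldl_modify_key _ _ _ _ _ (by simp [PySem.Dict.keys_empty])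

lemma dictA_getD (names : List String) (k : Int) :
    ((PySem.List.enumerate names).foldl
      (fun d p => d.modify (PySem.Str.len p.2) [] (fun v => v ++ [(p.2, p.1)]))
      (PySem.Dict.empty : PySem.Dict Int (List (String × Int)))).getD k []
    = ((PySem.List.enumerate names).filter (fun p => PySem.Str.len p.2 == k)).map
        (fun p => (p.2, p.1)) := by
  rw [show (PySem.List.enumerate names).foldl
      (fun d p => d.modify (PySem.Str.len p.2) [] (fun v => v ++ [(p.2, p.1)]))
      (PySem.Dict.empty : PySem.Dict Int (List (String × Int)))
    = ((PySem.List.enumerate names).map (fun p => (PySem.Str.len p.2, (p.2, p.1)))).foldl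
        (fun d q => d.modify q.1 [] (fun v => v ++ [q.2])) PySem.Dict.empty from by
      simp [List.foldl_map]]
  rw [PySem.Dict.getD_foldl_modify_append, PySem.Dict.getD_empty, List.filter_map, List.map_map]
  rfl

lemma dictB_getD (names : List String) (k : Int) :
    ((PySem.List.enumerate names).foldl
      (fun d p => d.modify (PySem.Str.len p.2) [] (fun v => v ++ [p.1]))
      (PySem.Dict.empty : PySem.Dict Int (List Int))).getD k []
    = ((PySem.List.enumerate names).filter (fun p => PySem.Str.len p.2 == k)).map
        (fun p => p.1) := by
  rw [show (PySem.List.enumerate names).foldl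
      (fun d p => d.modify (PySem.Str.len p.2) [] (fun v => v ++ [p.1]))
      (PySem.Dict.empty : PySem.Dict Int (List Int))
    = ((PySem.List.enumerate names).map (fun p => (PySem.Str.len p.2, p.1))).foldl
        (fun d q => d.modify q.1 [] (fun v => v ++ [q.2])) PySem.Dict.empty from by
      simp [List.foldl_map]]
  rw [PySem.Dict.getD_foldl_modify_append, PySem.Dict.getD_empty, List.filter_map, List.map_map]
  rfl


lemma solution_eq_alt (N K : Int) (names : List String) : solution N K names = solution_alt N K names := by
  unfold solution solution_alt
  simp only []
  rw [items_eq_map_keys _ (dictA_nodup names) [], dictA_keys names]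
  simp only [PySem.Dict.values]
  rw [items_eq_map_keys _ (dictB_nodup names) [], dictB_keys names]
  simp only [List.foldl_map, List.map_map, Function.comp]
  apply PySem.List.foldl_congr_mem
  intro c k _
  rw [dictA_getD, dictB_getD, groupLoopA_eq_loopA, List.map_map]
  have hsorted : (((PySem.List.enumerate names).filter (fun p => PySem.Str.len p.2 == k)).map
      (fun p => p.1)).Pairwise (· ≤ ·) := grades_sorted names k
  set gs := ((PySem.List.enumerate names).filter (fun p => PySem.Str.len p.2 == k)).map
      (fun p => p.1) with hgs
  have hL : loopA K gs c [] = loopB K gs c [] :=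
    loopA_eq_loopB K gs c [] [] hsorted List.Pairwise.nil (fun _ _ => rfl)
      (by intro x hx; cases hx)
  have hR := enumFold_eq_loopB K gs hsorted gs 0 c (by simp)
  simp only [Nat.cast_zero, List.take_zero] at hR
  rw [show (Prod.snd ∘ fun (p : Int × String) => (p.2, p.1)) = (fun p => p.1) from rfl]
  rw [← hgs, hL, ← hR]

-- ===== VERDICT (by name: the statement is the Claim_ definition above) =====
theorem solution_spec : Claim_equal_solution := by
  intro N K names _
  unfold Spec_solution
  exact solution_eq_alt N K names
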